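-- pv_equiv track=rewrite | github.com/voxel51/voxelgpt | links/tag_selector.py | validate_tag
-- ===== SOURCE A (Python) =====
-- def validate_tag(candidate_tag, allowed_tags):
--     if candidate_tag in allowed_tags:
--         return candidate_tag
--
--     # try matching with case-insensitive
--     for tag in allowed_tags:
--         if candidate_tag.lower() == tag.lower():
--             return tag
--
--     # try matching with prefix
--     for tag in allowed_tags:
--         if tag.lower().startswith(candidate_tag.lower()):
--             return tag
--         elif candidate_tag.lower().startswith(tag.lower()):
--             return tag
--
--     return None
-- ===== SOURCE B (Python) =====
-- def validate_tag(candidate_tag, allowed_tags):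
--     if candidate_tag in allowed_tags:
--         return candidate_tag
--     cl = candidate_tag.lower()
--     prefix_match = None
--     for tag in allowed_tags:
--         tl = tag.lower()
--         if cl == tl:
--             return tag
--         if prefix_match is None and (tl.startswith(cl) or cl.startswith(tl)):
--             prefix_match = tag
--     return prefix_match
-- ===== Notes on version B (the rewrite author's own statement) =====
-- stated objective: faster
-- what changed: Collapses A's two full scans into one priority-aware pass that lowers each tag once and records the first prefix match while searching for a case-insensitive equal match.
import Mathlib
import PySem

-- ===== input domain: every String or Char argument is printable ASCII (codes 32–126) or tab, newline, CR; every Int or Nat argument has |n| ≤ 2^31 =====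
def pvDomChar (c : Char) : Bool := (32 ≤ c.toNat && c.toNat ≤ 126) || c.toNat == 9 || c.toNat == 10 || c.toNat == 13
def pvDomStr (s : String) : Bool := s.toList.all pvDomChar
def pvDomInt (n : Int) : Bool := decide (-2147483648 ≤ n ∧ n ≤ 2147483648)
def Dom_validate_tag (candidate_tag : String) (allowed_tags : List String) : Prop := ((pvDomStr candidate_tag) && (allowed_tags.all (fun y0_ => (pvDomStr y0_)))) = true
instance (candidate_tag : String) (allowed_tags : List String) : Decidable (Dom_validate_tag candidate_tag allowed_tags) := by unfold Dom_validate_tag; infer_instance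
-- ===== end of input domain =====

-- B replaces A's two separate scans by one pass that lowers each tag once, returning on a
-- case-insensitive equal match and remembering the first prefix match; objective: faster (constant factor).

-- ===== PORT A =====
-- A's first loop: return the first tag whose lower() equals candidate's lower()
def vtCiLoop (candidate_tag : String) : List String → Option String
  | [] => none
  | t :: ts =>
    if PySem.Str.lower candidate_tag == PySem.Str.lower t then some t
    else vtCiLoop candidate_tag ts

-- A's second loop: return the first tag related to candidate by either prefix condition
def vtPrefixLoop (candidate_tag : String) : List String → Option String
  | [] => none
  | t :: ts =>
    if PySem.Str.startswith (PySem.Str.lower t) (PySem.Str.lower candidate_tag) then some t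
    else if PySem.Str.startswith (PySem.Str.lower candidate_tag) (PySem.Str.lower t) then some t
    else vtPrefixLoop candidate_tag ts

def validate_tag (candidate_tag : String) (allowed_tags : List String) : Option String :=
  if candidate_tag ∈ allowed_tags then some candidate_tag
  else
    match vtCiLoop candidate_tag allowed_tags with
    | some t => some t
    | none =>
      match vtPrefixLoop candidate_tag allowed_tags with
      | some t => some t
      | none => none

-- ===== PORT B =====
-- B's single loop: `pm` is the recorded prefix_match
def vtAltLoop (cl : String) (pm : Option String) : List String → Option String
  | [] => pm
  | t :: ts =>
    let tl := PySem.Str.lower t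
    if cl == tl then some t
    else
      vtAltLoop cl
        (if pm.isNone && (PySem.Str.startswith tl cl || PySem.Str.startswith cl tl)
         then some t else pm) ts

def validate_tag_alt (candidate_tag : String) (allowed_tags : List String) : Option String :=
  if candidate_tag ∈ allowed_tags then some candidate_tag
  else vtAltLoop (PySem.Str.lower candidate_tag) none allowed_tags

-- ===== PRECONDITION & SPEC =====
def Spec_validate_tag (candidate_tag : String) (allowed_tags : List String) (out : Option String) : Prop := out = validate_tag_alt candidate_tag allowed_tags
instance (candidate_tag : String) (allowed_tags : List String) (out : Option String) : Decidable (Spec_validate_tag candidate_tag allowed_tags out) := by unfold Spec_validate_tag; infer_instance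

-- ===== CLAIM (what is proved, stated in full; the proofs are below) =====
def Claim_equal_validate_tag : Prop := ∀ (candidate_tag : String) (allowed_tags : List String), Dom_validate_tag candidate_tag allowed_tags → Spec_validate_tag candidate_tag allowed_tags (validate_tag candidate_tag allowed_tags)

-- ===== LEMMAS AND PROOFS =====

-- B's single pass equals: first case-insensitive match, else the carried pm, else A's prefix scan.
theorem vtAltLoop_eq (c : String) (ts : List String) : ∀ pm : Option String,
    vtAltLoop (PySem.Str.lower c) pm ts =
      match vtCiLoop c ts with
      | some t => some t
      | none => pm.or (vtPrefixLoop c ts) := by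
  induction ts with
  | nil => intro pm; simp [vtAltLoop, vtCiLoop, vtPrefixLoop]
  | cons t ts ih =>
    intro pm
    by_cases h : (PySem.Str.lower c == PySem.Str.lower t) = true
    · simp [vtAltLoop, vtCiLoop, h]
    · simp only [vtAltLoop, vtCiLoop, h, Bool.false_eq_true, if_false, ih]
      cases hci : vtCiLoop c ts with
      | some u => simp
      | none =>
        simp only []
        cases pm with
        | some x => simp [vtPrefixLoop]
        | none =>
          simp only [vtPrefixLoop, Option.isNone_none, Bool.true_and, Option.none_or,
            Bool.or_eq_true]
          split_ifs <;> simp_all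

-- ===== VERDICT (by name: the statement is the Claim_ definition above) =====
theorem validate_tag_spec : Claim_equal_validate_tag := by
  intro c ts _
  unfold Spec_validate_tag validate_tag validate_tag_alt
  by_cases hm : c ∈ ts
  · simp [hm]
  · simp only [hm, if_false, vtAltLoop_eq]
    cases vtCiLoop c ts <;> cases vtPrefixLoop c ts <;> simp
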